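-- pv_equiv track=rewrite | github.com/marcepanowyy/Algorithms-DataStructures | trashh/water/BitAlgoStartCzw9.35/29kwiecien/Z4.py | map_spans
-- ===== SOURCE A (Python) =====
-- def binary_search(A: 'sorted array', val: 'searched value'):
--     n = len(A)
--     l = 0
--     r = n - 1
--     while l <= r:
--         m = (l + r) // 2
--         if A[m] < val:
--             l = m + 1
--         else:
--             r = m - 1
--     return l if l < n and A[l] == val else -1
--
-- def map_spans(S: 'array of spans'):
--     # Unpack all coordinates to one array and sort them in a non-decreasing order
--     n = len(S)
--     A = [0] * (2 * n)
--     for i in range(n):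
--         A[2 * i] = S[i][0]
--         A[2 * i + 1] = S[i][1]
--     A.sort()
--
--     # Filter out repeated values
--     B = [A[0]]
--     for i in range(1, 2 * n):
--         if A[i - 1] == A[i]:
--             continue
--         B.append(A[i])
--
--     # Map spans (change their coordiantes to natural numbers)
--     for i in range(n):
--         S[i][0] = binary_search(B, S[i][0])
--         S[i][1] = binary_search(B, S[i][1])
--
--     # Return array of sorted coordinates with no repetitions
--     return B
-- ===== SOURCE B (Python) =====
-- def map_spans(S: 'array of spans'):
--     # Decorate every endpoint as (value, span_index, which_end) and sort once;
--     # one ordered pass assigns ranks (no binary search). Mutates S in place like A.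
--     pts = sorted((S[i][j], i, j) for i in range(len(S)) for j in (0, 1))
--     v0, i0, j0 = pts[0]
--     B = [v0]
--     r = 0
--     S[i0][j0] = 0
--     for v, i, j in pts[1:]:
--         if v > B[-1]:
--             B.append(v)
--             r += 1
--         S[i][j] = r
--     return B
-- ===== Notes on version B (the rewrite author's own statement) =====
-- stated objective: alternative
-- what changed: Replaces A's unpack-sort-dedup plus a binary search per span endpoint by one sort of decorated endpoints (value, span_index, which_end) and a single ordered pass that builds the unique list and assigns ranks with no searching.
import Mathlib
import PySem

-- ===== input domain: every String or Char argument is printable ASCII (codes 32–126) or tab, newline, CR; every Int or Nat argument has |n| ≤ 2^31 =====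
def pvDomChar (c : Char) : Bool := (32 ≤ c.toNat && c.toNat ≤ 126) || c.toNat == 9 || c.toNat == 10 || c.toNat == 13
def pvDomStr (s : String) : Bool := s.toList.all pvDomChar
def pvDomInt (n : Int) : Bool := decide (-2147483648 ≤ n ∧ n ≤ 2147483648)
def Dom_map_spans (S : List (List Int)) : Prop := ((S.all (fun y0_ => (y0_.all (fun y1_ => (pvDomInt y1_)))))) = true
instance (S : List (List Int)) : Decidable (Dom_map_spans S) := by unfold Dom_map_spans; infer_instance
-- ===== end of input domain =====

-- B replaces A's dedup-then-binary-search coordinate compression by one sort of decorated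
-- endpoints and a single ordered rank-assigning pass (objective: alternative decomposition).
-- Both Pythons mutate S in place identically; the equivalence proved here is about the RETURN value.


-- ===== PORT A =====
-- Literal port of A's three phases.  The third Python loop (binary_search re-mapping) only
-- mutates S in place and does not touch the returned list B, so it has no counterpart in the
-- returned value; the claim (see header) is about the return value.
def map_spans (S : List (List Int)) : List Int :=
  let n : Int := S.length
  let A0 : List Int := List.replicate (2 * S.length) 0
  let A : List Int :=
    (PySem.List.pyRange 0 n 1).foldl
      (fun A i =>
        PySem.List.pySetD
          (PySem.List.pySetD A (2 * i) (PySem.List.pyGetD (PySem.List.pyGetD S i []) 0 0))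
          (2 * i + 1) (PySem.List.pyGetD (PySem.List.pyGetD S i []) 1 0)) A0
  let As : List Int := PySem.List.sorted A (fun x => x) false
  (PySem.List.pyRange 1 (2 * n) 1).foldl
    (fun B i =>
      if PySem.List.pyGetD As (i - 1) 0 = PySem.List.pyGetD As i 0 then B
      else B ++ [PySem.List.pyGetD As i 0])
    [PySem.List.pyGetD As 0 0]

-- ===== PORT B =====
-- Python sorts the tuples (value, i, j) lexicographically; the generator emits (i, j) in
-- strictly increasing order, so the STABLE sort keyed on the value alone produces the same
-- list — ported as `sorted _ (·.1) false`.
def map_spans_alt (S : List (List Int)) : List Int :=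
  let pts : List (Int × Int × Int) :=
    PySem.List.sorted
      ((PySem.List.pyRange 0 (S.length : Int) 1).flatMap
        (fun i => ([0, 1] : List Int).map
          (fun j => (PySem.List.pyGetD (PySem.List.pyGetD S i []) j 0, i, j))))
      (fun t => t.1) false
  let first : Int × Int × Int := PySem.List.pyGetD pts 0 (0, 0, 0)
  ((PySem.List.slice pts (some 1) none).foldl
    (fun (Br : List Int × Int) t =>
      if PySem.List.pyGetD Br.1 (-1) 0 < t.1 then (Br.1 ++ [t.1], Br.2 + 1) else Br)
    ([first.1], 0)).1

-- ===== PRECONDITION & SPEC =====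
-- Pre_ excludes exactly the inputs on which Python A raises IndexError: the empty list
-- (A reads A[0] of an empty list) and any span row with fewer than two entries (A reads S[i][1]).
def Pre_map_spans (S : List (List Int)) : Prop := S ≠ [] ∧ ∀ row ∈ S, 2 ≤ row.length
instance (S : List (List Int)) : Decidable (Pre_map_spans S) := by unfold Pre_map_spans; infer_instance
def pvWitness_map_spans : List (List Int) := [[1, 3], [2, 3]]
def Spec_map_spans (S : List (List Int)) (out : List Int) : Prop := out = map_spans_alt S
instance (S : List (List Int)) (out : List Int) : Decidable (Spec_map_spans S out) := by unfold Spec_map_spans; infer_instance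

-- ===== CLAIM (what is proved, stated in full; the proofs are below) =====
def Claim_equal_map_spans : Prop := ∀ (S : List (List Int)), Dom_map_spans S → Pre_map_spans S → Spec_map_spans S (map_spans S)

-- ===== LEMMAS AND PROOFS =====

-- the flat list of endpoints of S, in order (what A's first loop fills in)
def pvEnds (S : List (List Int)) : List Int :=
  S.flatMap (fun row => [PySem.List.pyGetD row 0 0, PySem.List.pyGetD row 1 0])

-- dedup comparing with the PREVIOUS element (A's second loop on a sorted list)
def pvDedupPrev (p : Int) : List Int → List Int
  | [] => []
  | y :: ys => if p = y then pvDedupPrev y ys else y :: pvDedupPrev y ys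

-- dedup comparing with the last KEPT element (B's single pass)
def pvDedupKept (p : Int) : List Int → List Int
  | [] => []
  | y :: ys => if p < y then y :: pvDedupKept y ys else pvDedupKept p ys

lemma pvEnds_length (S : List (List Int)) : (pvEnds S).length = 2 * S.length := by
  induction S with
  | nil => rfl
  | cons r t ih => simp [pvEnds] at ih ⊢; omega

lemma pvSetTake (L : List Int) (m : Nat) (a b : Int) (h : m + 1 < L.length) :
    ((L.set m a).set (m + 1) b).take (m + 2) = L.take m ++ [a, b] := by
  have h0 : m < L.length := by omega
  have hA : (L.set m a).take (m + 1) = L.take m ++ [a] := by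
    rw [List.set_eq_take_cons_drop a h0,
        show m + 1 = (L.take m).length + 1 by simp; omega,
        List.take_append]
    simp
  have h1 : m + 1 < (L.set m a).length := by simpa using h
  rw [List.set_eq_take_cons_drop b h1,
      show m + 2 = ((L.set m a).take (m + 1)).length + 1 by simp; omega,
      List.take_append]
  rw [hA, List.take_of_length_le (by simp)]
  simp

lemma pvFill_general (S : List (List Int)) (k : Nat) (hk : k ≤ S.length)
    (L : List Int) (hL : L.length = 2 * S.length) :
    (PySem.List.pyRange (k : Int) (S.length : Int) 1).foldl
      (fun A i =>
        PySem.List.pySetD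
          (PySem.List.pySetD A (2 * i) (PySem.List.pyGetD (PySem.List.pyGetD S i []) 0 0))
          (2 * i + 1) (PySem.List.pyGetD (PySem.List.pyGetD S i []) 1 0)) L
    = L.take (2 * k) ++ pvEnds (S.drop k) := by
  induction hd : S.length - k generalizing k L with
  | zero =>
    have hk' : k = S.length := by omega
    subst hk'
    rw [PySem.List.pyRange_one_eq_nil (by omega)]
    rw [List.take_of_length_le (le_of_eq hL)]
    simp [pvEnds]
  | succ d ih =>
    have hklt : k < S.length := by omega
    rw [PySem.List.pyRange_one_cons (by exact_mod_cast hklt)]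
    simp only [List.foldl_cons]
    have hrow : PySem.List.pyGetD S (k : Int) [] = S[k] := by
      rw [PySem.List.pyGetD_natCast]; exact List.getD_eq_getElem S [] hklt
    have hc1 : (2 : Int) * (k : Int) = ((2 * k : Nat) : Int) := by push_cast; ring
    rw [hrow, hc1,
        show ((2 * k : Nat) : Int) + 1 = ((2 * k + 1 : Nat) : Int) by push_cast; ring,
        PySem.List.pySetD_natCast, PySem.List.pySetD_natCast]
    have hL' : (((L.set (2 * k) (PySem.List.pyGetD S[k] 0 0)).set (2 * k + 1)
        (PySem.List.pyGetD S[k] 1 0))).length = 2 * S.length := by simpa using hL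
    rw [show (k : Int) + 1 = ((k + 1 : Nat) : Int) by omega,
        ih (k + 1) (by omega) _ hL' (by omega)]
    rw [show 2 * (k + 1) = 2 * k + 2 by ring,
        pvSetTake L (2 * k) _ _ (by omega),
        List.drop_eq_getElem_cons hklt]
    simp only [pvEnds, List.flatMap_cons, List.append_assoc, List.cons_append, List.nil_append]

lemma pvDedupA_general (xs : List Int) (k : Nat) (hk1 : 1 ≤ k) (hk2 : k ≤ xs.length)
    (acc : List Int) :
    (PySem.List.pyRange (k : Int) (xs.length : Int) 1).foldl
      (fun B i =>
        if PySem.List.pyGetD xs (i - 1) 0 = PySem.List.pyGetD xs i 0 then B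
        else B ++ [PySem.List.pyGetD xs i 0]) acc
    = acc ++ pvDedupPrev (xs.getD (k - 1) 0) (xs.drop k) := by
  induction hd : xs.length - k generalizing k acc with
  | zero =>
    have hk : k = xs.length := by omega
    subst hk
    rw [PySem.List.pyRange_one_eq_nil (by omega)]
    simp [pvDedupPrev]
  | succ d ih =>
    have hklt : k < xs.length := by omega
    rw [PySem.List.pyRange_one_cons (by exact_mod_cast hklt)]
    simp only [List.foldl_cons]
    have h1 : PySem.List.pyGetD xs ((k : Int) - 1) 0 = xs.getD (k - 1) 0 := by
      rw [show ((k : Int) - 1) = ((k - 1 : Nat) : Int) by omega]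
      simp
    have h2 : PySem.List.pyGetD xs (k : Int) 0 = xs[k] := by
      rw [PySem.List.pyGetD_natCast]
      exact List.getD_eq_getElem xs 0 hklt
    have hdrop : xs.drop k = xs[k] :: xs.drop (k + 1) := List.drop_eq_getElem_cons hklt
    rw [h1, h2]
    have hcast : (k : Int) + 1 = ((k + 1 : Nat) : Int) := by omega
    have hg : xs.getD (k + 1 - 1) 0 = xs[k] := by
      simp only [Nat.add_sub_cancel]; exact List.getD_eq_getElem xs 0 hklt
    by_cases he : xs.getD (k - 1) 0 = xs[k]
    · rw [if_pos he, hcast, ih (k+1) (by omega) (by omega) acc (by omega), hdrop, hg]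
      simp only [pvDedupPrev, if_pos he]
    · rw [if_neg he, hcast, ih (k+1) (by omega) (by omega) _ (by omega), hdrop, hg]
      simp only [pvDedupPrev, if_neg he, List.append_assoc, List.singleton_append]


lemma pvDedup_eq (p : Int) (xs : List Int) (h : List.IsChain (· ≤ ·) (p :: xs)) :
    pvDedupPrev p xs = pvDedupKept p xs := by
  induction xs generalizing p with
  | nil => rfl
  | cons y ys ih =>
    rcases List.isChain_cons_cons.mp h with ⟨hpy, hrest⟩
    simp only [pvDedupPrev, pvDedupKept]
    by_cases hpe : p = y
    · subst hpe
      simp [ih p hrest]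
    · have hlt : p < y := lt_of_le_of_ne hpy hpe
      simp [hpe, hlt, ih y hrest]

lemma pvDedupB_general (ts : List (Int × Int × Int)) (B : List Int) (r : Int) (hB : B ≠ []) :
    (ts.foldl
      (fun (Br : List Int × Int) t =>
        if PySem.List.pyGetD Br.1 (-1) 0 < t.1 then (Br.1 ++ [t.1], Br.2 + 1) else Br)
      (B, r)).1
    = B ++ pvDedupKept (B.getLast hB) (ts.map (·.1)) := by
  induction ts generalizing B r with
  | nil => simp [pvDedupKept]
  | cons t ts ih =>
    simp only [List.foldl_cons, List.map_cons, pvDedupKept]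
    rw [show PySem.List.pyGetD B (-1) (0:Int) = B.getLast hB from PySem.List.pyGetD_neg_one (xs := B) 0 hB]
    by_cases hlt : B.getLast hB < t.1
    · simp only [hlt, if_pos]
      rw [ih (B ++ [t.1]) (r + 1) (by simp)]
      simp
    · simp only [hlt, if_false]
      rw [ih B r hB]


lemma pvFlatMap_pyRange {β : Type} (S : List (List Int)) (h : List Int → List β) :
    (PySem.List.pyRange 0 (S.length : Int) 1).flatMap (fun i => h (PySem.List.pyGetD S i []))
    = S.flatMap h := by
  have hmap : (PySem.List.pyRange 0 (S.length : Int) 1).map (fun i => PySem.List.pyGetD S i []) = S := by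
    simpa using PySem.List.map_pyGetD_pyRange_zero (xs := S) (d := [])
  conv_rhs => rw [← hmap]
  rw [List.flatMap_map]


-- ===== VERDICT (by name: the statement is the Claim_ definition above) =====
theorem map_spans_spec : Claim_equal_map_spans := by
  intro S _hDom hPre
  obtain ⟨hne, -⟩ := hPre
  have hSpos : 0 < S.length := List.length_pos_iff.mpr hne
  unfold Spec_map_spans map_spans map_spans_alt
  dsimp only
  have hfill := pvFill_general S 0 (by omega) (List.replicate (2 * S.length) 0) (by simp)
  simp only [Nat.cast_zero] at hfill
  rw [hfill]
  simp only [List.drop_zero, Nat.mul_zero, List.take_zero, List.nil_append]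
  set T : List (Int × Int × Int) :=
    (PySem.List.pyRange 0 (S.length : Int) 1).flatMap
      (fun i => ([0, 1] : List Int).map
        (fun j => (PySem.List.pyGetD (PySem.List.pyGetD S i []) j 0, i, j))) with hT
  set zs := PySem.List.sorted T (fun t => t.1) false with hzs
  have hTmap : T.map (·.1) = pvEnds S := by
    rw [hT, List.map_flatMap]
    have hrow : ∀ i : Int, (([0, 1] : List Int).map
        (fun j => (PySem.List.pyGetD (PySem.List.pyGetD S i []) j 0, i, j))).map (·.1)
        = [PySem.List.pyGetD (PySem.List.pyGetD S i []) 0 0,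
           PySem.List.pyGetD (PySem.List.pyGetD S i []) 1 0] := by
      intro i; simp
    simp only [hrow]
    exact pvFlatMap_pyRange S (fun row => [PySem.List.pyGetD row 0 0, PySem.List.pyGetD row 1 0])
  have hperm : (zs.map (·.1)).Perm (pvEnds S) := by
    rw [← hTmap]
    exact (PySem.List.sorted_perm T (fun t => t.1) false).map _
  have hpw : (zs.map (·.1)).Pairwise (· ≤ ·) := by
    rw [hzs]; exact PySem.List.sorted_map_key_pairwise T (fun t => t.1)
  have hsorted : PySem.List.sorted (pvEnds S) (fun x => x) false = zs.map (·.1) :=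
    PySem.List.sorted_id_eq_of_perm_of_pairwise _ _ hperm hpw
  rw [hsorted]
  have hlen : (zs.map (·.1)).length = 2 * S.length := by
    rw [hperm.length_eq, pvEnds_length]
  obtain ⟨z, zt, hz⟩ : ∃ z zt, zs = z :: zt := by
    cases h : zs with
    | nil => exfalso; rw [h] at hlen; simp at hlen; exact hne hlen
    | cons a l => exact ⟨a, l, rfl⟩
  have h2n : 2 * ((S.length : Nat) : Int) = (((zs.map (·.1)).length : Nat) : Int) := by
    rw [hlen]; push_cast; ring
  have hA := pvDedupA_general (zs.map (·.1)) 1 le_rfl (by rw [hlen]; omega)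
    [PySem.List.pyGetD (zs.map (·.1)) 0 0]
  simp only [Nat.cast_one] at hA
  rw [h2n, hA]
  rw [PySem.List.slice_from_one, hz]
  simp only [List.map_cons, List.tail_cons, List.drop_succ_cons, List.drop_zero,
    PySem.List.pyGetD_zero_cons, List.getD_cons_zero, Nat.sub_self,
    List.cons_append, List.nil_append]
  rw [pvDedupB_general zt [(z.1)] 0 (by simp)]
  simp only [List.getLast_singleton, List.cons_append, List.nil_append]
  congr 1
  apply pvDedup_eq
  rw [hz] at hpw
  simp only [List.map_cons] at hpw
  exact hpw.isChain
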